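-- pv_equiv track=rewrite | github.com/yaroona224/Cardblur-ABSHER | streamlit_app.py | enforce_card_rule
-- ===== SOURCE A (Python) =====
-- def center(x1, y1, x2, y2):
--     return ((x1 + x2) // 2, (y1 + y2) // 2)
--
-- def contains(box, pt):
--     x1, y1, x2, y2 = box
--     x, y = pt
--     return (x1 <= x <= x2) and (y1 <= y <= y2)
--
-- def enforce_card_rule(doc_boxes, face_boxes, text_boxes):
--     """
--     Keep only document boxes that contain BOTH:
--     - at least one face box
--     - at least one text box
--
--     Also filter face_boxes and text_boxes so we only keep the ones inside
--     those valid document boxes. This enforces the ID/passport rule.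
--     """
--     if not doc_boxes:
--         return [], [], []
--
--     valid_docs = []
--     for d in doc_boxes:
--         has_face = any(contains(d, center(*fb)) for fb in face_boxes)
--         has_text = any(contains(d, center(*tb)) for tb in text_boxes)
--         if has_face and has_text:
--             valid_docs.append(d)
--
--     if not valid_docs:
--         return [], [], []
--
--     filtered_faces = [
--         fb for fb in face_boxes if any(contains(d, center(*fb)) for d in valid_docs)
--     ]
--     filtered_texts = [
--         tb for tb in text_boxes if any(contains(d, center(*tb)) for d in valid_docs)
--     ]
--
--     return valid_docs, filtered_faces, filtered_texts
-- ===== SOURCE B (Python) =====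
-- def center(x1, y1, x2, y2):
--     return ((x1 + x2) // 2, (y1 + y2) // 2)
--
-- def contains(box, pt):
--     x1, y1, x2, y2 = box
--     x, y = pt
--     return (x1 <= x <= x2) and (y1 <= y <= y2)
--
-- def enforce_card_rule(doc_boxes, face_boxes, text_boxes):
--     if not doc_boxes:
--         return [], [], []
--
--     face_centers = [center(*fb) for fb in face_boxes]
--     text_centers = [center(*tb) for tb in text_boxes]
--
--     valid_docs = []
--     keep_faces = set()
--     keep_texts = set()
--     for d in doc_boxes:
--         fidx = {i for i, c in enumerate(face_centers) if contains(d, c)}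
--         tidx = {i for i, c in enumerate(text_centers) if contains(d, c)}
--         if fidx and tidx:
--             valid_docs.append(d)
--             keep_faces |= fidx
--             keep_texts |= tidx
--
--     if not valid_docs:
--         return [], [], []
--
--     filtered_faces = [fb for i, fb in enumerate(face_boxes) if i in keep_faces]
--     filtered_texts = [tb for i, tb in enumerate(text_boxes) if i in keep_texts]
--     return valid_docs, filtered_faces, filtered_texts
-- ===== Notes on version B (the rewrite author's own statement) =====
-- stated objective: faster
-- what changed: Instead of re-scanning face/text boxes with a containment 'any' for every doc and then re-testing every face/text box against every valid doc, B precomputes all centers once, collects per-doc contained index sets in a single pass over doc_boxes while accumulating cumulative keep-index sets, and builds the filtered lists by index membership with enumerate.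
import Mathlib
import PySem

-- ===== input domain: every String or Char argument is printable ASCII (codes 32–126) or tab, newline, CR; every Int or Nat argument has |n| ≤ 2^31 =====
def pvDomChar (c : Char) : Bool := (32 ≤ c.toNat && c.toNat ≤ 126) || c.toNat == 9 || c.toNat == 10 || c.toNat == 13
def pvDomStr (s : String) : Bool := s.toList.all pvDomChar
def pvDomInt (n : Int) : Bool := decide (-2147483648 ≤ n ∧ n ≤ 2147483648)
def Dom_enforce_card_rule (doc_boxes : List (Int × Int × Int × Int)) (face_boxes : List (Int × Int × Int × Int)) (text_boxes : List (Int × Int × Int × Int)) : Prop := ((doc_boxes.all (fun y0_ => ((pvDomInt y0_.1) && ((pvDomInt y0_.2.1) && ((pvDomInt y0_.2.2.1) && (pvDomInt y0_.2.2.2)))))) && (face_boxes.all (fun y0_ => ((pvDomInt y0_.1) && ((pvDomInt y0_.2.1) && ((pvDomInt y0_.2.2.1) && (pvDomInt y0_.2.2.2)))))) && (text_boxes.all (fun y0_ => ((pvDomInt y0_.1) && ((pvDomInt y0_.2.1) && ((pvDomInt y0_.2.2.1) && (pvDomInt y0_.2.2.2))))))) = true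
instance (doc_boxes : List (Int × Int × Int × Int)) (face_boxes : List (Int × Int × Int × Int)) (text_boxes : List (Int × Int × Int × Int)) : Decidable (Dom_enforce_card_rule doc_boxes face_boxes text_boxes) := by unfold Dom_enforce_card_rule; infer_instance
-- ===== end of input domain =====

-- B replaces A's repeated per-doc 'any' scans and second containment pass by one pass over doc_boxes
-- collecting contained index sets and filtering faces/texts by index membership (measured faster in a timing run).


-- shared module helpers (center, contains), exactly as in the Python module
def pvCenter (b : Int × Int × Int × Int) : Int × Int :=
  (PySem.Int.floordiv (b.1 + b.2.2.1) 2, PySem.Int.floordiv (b.2.1 + b.2.2.2) 2)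

def pvContains (box : Int × Int × Int × Int) (pt : Int × Int) : Bool :=
  (decide (box.1 ≤ pt.1 ∧ pt.1 ≤ box.2.2.1)) && (decide (box.2.1 ≤ pt.2 ∧ pt.2 ≤ box.2.2.2))

-- ===== PORT A =====
def enforce_card_rule (doc_boxes : List (Int × Int × Int × Int)) (face_boxes : List (Int × Int × Int × Int)) (text_boxes : List (Int × Int × Int × Int)) : (List (Int × Int × Int × Int)) × (List (Int × Int × Int × Int)) × (List (Int × Int × Int × Int)) :=
  if doc_boxes = [] then ([], [], []) else
  let valid_docs := doc_boxes.foldl (fun acc d =>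
    if (face_boxes.any (fun fb => pvContains d (pvCenter fb)))
        && (text_boxes.any (fun tb => pvContains d (pvCenter tb)))
    then acc ++ [d] else acc) []
  if valid_docs = [] then ([], [], []) else
  (valid_docs,
   face_boxes.filter (fun fb => valid_docs.any (fun d => pvContains d (pvCenter fb))),
   text_boxes.filter (fun tb => valid_docs.any (fun d => pvContains d (pvCenter tb))))

-- ===== PORT B =====
-- per-doc index comprehension {i for i, c in enumerate(centers) if contains(d, c)}
def pvIdxSet (d : Int × Int × Int × Int) (centers : List (Int × Int)) : PySem.Set Int :=
  PySem.Set.ofList (((PySem.List.enumerate centers 0).filter (fun p => pvContains d p.2)).map (·.1))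

def enforce_card_rule_alt (doc_boxes : List (Int × Int × Int × Int)) (face_boxes : List (Int × Int × Int × Int)) (text_boxes : List (Int × Int × Int × Int)) : (List (Int × Int × Int × Int)) × (List (Int × Int × Int × Int)) × (List (Int × Int × Int × Int)) :=
  if doc_boxes = [] then ([], [], []) else
  let face_centers := face_boxes.map pvCenter
  let text_centers := text_boxes.map pvCenter
  let st := doc_boxes.foldl
    (fun (st : List (Int × Int × Int × Int) × PySem.Set Int × PySem.Set Int) d =>
      let fidx := pvIdxSet d face_centers
      let tidx := pvIdxSet d text_centers
      if fidx ≠ [] ∧ tidx ≠ [] then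
        (st.1 ++ [d], PySem.Set.union st.2.1 fidx, PySem.Set.union st.2.2 tidx)
      else st) ([], [], [])
  if st.1 = [] then ([], [], []) else
  (st.1,
   ((PySem.List.enumerate face_boxes 0).filter (fun p => PySem.Set.contains st.2.1 p.1)).map (·.2),
   ((PySem.List.enumerate text_boxes 0).filter (fun p => PySem.Set.contains st.2.2 p.1)).map (·.2))

-- ===== PRECONDITION & SPEC =====
def Spec_enforce_card_rule (doc_boxes : List (Int × Int × Int × Int)) (face_boxes : List (Int × Int × Int × Int)) (text_boxes : List (Int × Int × Int × Int)) (out : (List (Int × Int × Int × Int)) × (List (Int × Int × Int × Int)) × (List (Int × Int × Int × Int))) : Prop := out = enforce_card_rule_alt doc_boxes face_boxes text_boxes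
instance (doc_boxes : List (Int × Int × Int × Int)) (face_boxes : List (Int × Int × Int × Int)) (text_boxes : List (Int × Int × Int × Int)) (out : (List (Int × Int × Int × Int)) × (List (Int × Int × Int × Int)) × (List (Int × Int × Int × Int))) : Decidable (Spec_enforce_card_rule doc_boxes face_boxes text_boxes out) := by unfold Spec_enforce_card_rule; infer_instance

-- ===== CLAIM (what is proved, stated in full; the proofs are below) =====
def Claim_equal_enforce_card_rule : Prop := ∀ (doc_boxes : List (Int × Int × Int × Int)) (face_boxes : List (Int × Int × Int × Int)) (text_boxes : List (Int × Int × Int × Int)), Dom_enforce_card_rule doc_boxes face_boxes text_boxes → Spec_enforce_card_rule doc_boxes face_boxes text_boxes (enforce_card_rule doc_boxes face_boxes text_boxes)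

-- ===== LEMMAS AND PROOFS =====

-- membership in a per-doc index set
lemma mem_pvIdxSet (d : Int × Int × Int × Int) (centers : List (Int × Int)) (i : Int) :
    i ∈ pvIdxSet d centers ↔ ∃ (k : Nat) (h : k < centers.length), i = (k : Int) ∧ pvContains d centers[k] = true := by
  simp [pvIdxSet, PySem.Set.mem_ofList, List.mem_filter, PySem.List.mem_enumerate_iff]

-- nonemptiness of a per-doc index set is A's 'any' test
lemma pvIdxSet_ne_nil_iff (d : Int × Int × Int × Int) (l : List (Int × Int × Int × Int)) :
    (pvIdxSet d (l.map pvCenter) ≠ []) ↔ l.any (fun b => pvContains d (pvCenter b)) = true := by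
  constructor
  · intro h
    obtain ⟨x, hx⟩ := List.exists_mem_of_ne_nil _ h
    rw [mem_pvIdxSet] at hx
    obtain ⟨k, hk, rfl, hc⟩ := hx
    rw [List.any_eq_true]
    refine ⟨l[k]'(by simpa using hk), List.getElem_mem _, ?_⟩
    simpa using hc
  · intro h
    rw [List.any_eq_true] at h
    obtain ⟨b, hb, hc⟩ := h
    obtain ⟨k, hk, rfl⟩ := List.mem_iff_getElem.mp hb
    exact List.ne_nil_of_mem ((mem_pvIdxSet d _ k).mpr ⟨k, by simpa using hk, rfl, by simpa using hc⟩)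

-- B's per-doc validity condition is A's per-doc validity condition
lemma cond_iff (d : Int × Int × Int × Int) (face text : List (Int × Int × Int × Int)) :
    (pvIdxSet d (List.map pvCenter face) ≠ [] ∧ pvIdxSet d (List.map pvCenter text) ≠ []) ↔
    ((face.any fun fb => pvContains d (pvCenter fb)) && (text.any fun tb => pvContains d (pvCenter tb))) = true := by
  rw [Bool.and_eq_true, pvIdxSet_ne_nil_iff, pvIdxSet_ne_nil_iff]

-- index form of mem_pvIdxSet on mapped centers
lemma mem_pvIdxSet_nat (d : Int × Int × Int × Int) (l : List (Int × Int × Int × Int)) (k : Nat) (hk : k < l.length) :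
    ((k : Int) ∈ pvIdxSet d (l.map pvCenter)) ↔ pvContains d (pvCenter l[k]) = true := by
  rw [mem_pvIdxSet]
  constructor
  · rintro ⟨k', hk', hEq, hc⟩
    have hkk : k' = k := by exact_mod_cast hEq.symm
    subst hkk
    simpa using hc
  · intro hc
    exact ⟨k, by simpa using hk, rfl, by simpa using hc⟩

-- the fold's first component is A's valid_docs fold
lemma fold_fst_eq (doc face text : List (Int × Int × Int × Int)) (acc : List (Int × Int × Int × Int)) (s t : PySem.Set Int) :
    (doc.foldl
      (fun (st : List (Int × Int × Int × Int) × PySem.Set Int × PySem.Set Int) d =>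
        if pvIdxSet d (face.map pvCenter) ≠ [] ∧ pvIdxSet d (text.map pvCenter) ≠ [] then
          (st.1 ++ [d], PySem.Set.union st.2.1 (pvIdxSet d (face.map pvCenter)), PySem.Set.union st.2.2 (pvIdxSet d (text.map pvCenter)))
        else st) (acc, s, t)).1
    = doc.foldl (fun acc d =>
        if (face.any (fun fb => pvContains d (pvCenter fb)))
            && (text.any (fun tb => pvContains d (pvCenter tb)))
        then acc ++ [d] else acc) acc := by
  induction doc generalizing acc s t with
  | nil => simp
  | cons d ds ih =>
    simp only [List.foldl_cons]
    split_ifs with h1 h2 h2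
    · exact ih ..
    · exact absurd ((cond_iff d face text).mp h1) h2
    · exact absurd ((cond_iff d face text).mpr h2) h1
    · exact ih ..

-- membership in the cumulative keep sets
lemma fold_keep_mem (doc face text : List (Int × Int × Int × Int)) (acc : List (Int × Int × Int × Int)) (s t : PySem.Set Int) (i : Int) :
    (i ∈ (doc.foldl
      (fun (st : List (Int × Int × Int × Int) × PySem.Set Int × PySem.Set Int) d =>
        if pvIdxSet d (face.map pvCenter) ≠ [] ∧ pvIdxSet d (text.map pvCenter) ≠ [] then
          (st.1 ++ [d], PySem.Set.union st.2.1 (pvIdxSet d (face.map pvCenter)), PySem.Set.union st.2.2 (pvIdxSet d (text.map pvCenter)))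
        else st) (acc, s, t)).2.1
      ↔ i ∈ s ∨ ∃ d ∈ doc, (pvIdxSet d (face.map pvCenter) ≠ [] ∧ pvIdxSet d (text.map pvCenter) ≠ []) ∧ i ∈ pvIdxSet d (face.map pvCenter))
    ∧ (i ∈ (doc.foldl
      (fun (st : List (Int × Int × Int × Int) × PySem.Set Int × PySem.Set Int) d =>
        if pvIdxSet d (face.map pvCenter) ≠ [] ∧ pvIdxSet d (text.map pvCenter) ≠ [] then
          (st.1 ++ [d], PySem.Set.union st.2.1 (pvIdxSet d (face.map pvCenter)), PySem.Set.union st.2.2 (pvIdxSet d (text.map pvCenter)))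
        else st) (acc, s, t)).2.2
      ↔ i ∈ t ∨ ∃ d ∈ doc, (pvIdxSet d (face.map pvCenter) ≠ [] ∧ pvIdxSet d (text.map pvCenter) ≠ []) ∧ i ∈ pvIdxSet d (text.map pvCenter)) := by
  induction doc generalizing acc s t with
  | nil => simp
  | cons d ds ih =>
    simp only [List.foldl_cons]
    split_ifs with h1
    · obtain ⟨ihf, iht⟩ := ih (acc ++ [d]) (PySem.Set.union s (pvIdxSet d (face.map pvCenter))) (PySem.Set.union t (pvIdxSet d (text.map pvCenter)))
      constructor
      · rw [ihf, PySem.Set.mem_union]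
        simp only [List.mem_cons]
        constructor
        · rintro ((hs | hf) | ⟨d', hd', hc, hm⟩)
          · exact Or.inl hs
          · exact Or.inr ⟨d, Or.inl rfl, h1, hf⟩
          · exact Or.inr ⟨d', Or.inr hd', hc, hm⟩
        · rintro (hs | ⟨d', (rfl | hd'), hc, hm⟩)
          · exact Or.inl (Or.inl hs)
          · exact Or.inl (Or.inr hm)
          · exact Or.inr ⟨d', hd', hc, hm⟩
      · rw [iht, PySem.Set.mem_union]
        simp only [List.mem_cons]
        constructor
        · rintro ((hs | hf) | ⟨d', hd', hc, hm⟩)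
          · exact Or.inl hs
          · exact Or.inr ⟨d, Or.inl rfl, h1, hf⟩
          · exact Or.inr ⟨d', Or.inr hd', hc, hm⟩
        · rintro (hs | ⟨d', (rfl | hd'), hc, hm⟩)
          · exact Or.inl (Or.inl hs)
          · exact Or.inl (Or.inr hm)
          · exact Or.inr ⟨d', hd', hc, hm⟩
    · obtain ⟨ihf, iht⟩ := ih acc s t
      constructor
      · rw [ihf]
        simp only [List.mem_cons]
        constructor
        · rintro (hs | ⟨d', hd', hc, hm⟩)
          · exact Or.inl hs
          · exact Or.inr ⟨d', Or.inr hd', hc, hm⟩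
        · rintro (hs | ⟨d', (rfl | hd'), hc, hm⟩)
          · exact Or.inl hs
          · exact absurd hc h1
          · exact Or.inr ⟨d', hd', hc, hm⟩
      · rw [iht]
        simp only [List.mem_cons]
        constructor
        · rintro (hs | ⟨d', hd', hc, hm⟩)
          · exact Or.inl hs
          · exact Or.inr ⟨d', Or.inr hd', hc, hm⟩
        · rintro (hs | ⟨d', (rfl | hd'), hc, hm⟩)
          · exact Or.inl hs
          · exact absurd hc h1
          · exact Or.inr ⟨d', hd', hc, hm⟩

-- filtering by index membership equals filtering by the element predicate
lemma filter_enumerate_eq (l : List (Int × Int × Int × Int)) (S : PySem.Set Int) (P : (Int × Int × Int × Int) → Bool) (s : Nat)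
    (h : ∀ (k : Nat) (hk : k < l.length), (((s + k : Nat) : Int) ∈ S ↔ P l[k] = true)) :
    ((PySem.List.enumerate l (s : Int)).filter (fun p => PySem.Set.contains S p.1)).map (·.2) = l.filter P := by
  induction l generalizing s with
  | nil => simp [PySem.List.enumerate_nil]
  | cons x xs ih =>
    rw [PySem.List.enumerate_cons, List.filter_cons, List.filter_cons]
    have h0 := h 0 (by simp)
    simp only [Nat.add_zero, List.getElem_cons_zero] at h0
    have hrest : ∀ (k : Nat) (hk : k < xs.length), (((s + 1 + k : Nat) : Int) ∈ S ↔ P xs[k] = true) := by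
      intro k hk
      have := h (k + 1) (by simpa using Nat.succ_lt_succ hk)
      simpa [Nat.add_comm, Nat.add_assoc, Nat.add_left_comm] using this
    have hstep : ((s : Int) + 1) = ((s + 1 : Nat) : Int) := by push_cast; ring
    by_cases hp : P x = true
    · have : PySem.Set.contains S (s : Int) = true := by
        rw [PySem.Set.contains_iff]; exact h0.mpr hp
      rw [if_pos (by simpa using this), if_pos hp, List.map_cons, hstep, ih _ hrest]
    · have : ¬ PySem.Set.contains S (s : Int) = true := by
        rw [PySem.Set.contains_iff]; exact fun hm => hp (h0.mp hm)
      rw [if_neg (by simpa using this), if_neg hp, hstep, ih _ hrest]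

-- ===== VERDICT (by name: the statement is the Claim_ definition above) =====
theorem enforce_card_rule_spec : Claim_equal_enforce_card_rule := by
  intro doc face text _
  unfold Spec_enforce_card_rule enforce_card_rule enforce_card_rule_alt
  by_cases hd : doc = []
  · simp [hd]
  · rw [if_neg hd, if_neg hd]
    simp only []
    rw [fold_fst_eq]
    set valid := doc.foldl (fun acc d =>
        if (face.any (fun fb => pvContains d (pvCenter fb)))
            && (text.any (fun tb => pvContains d (pvCenter tb)))
        then acc ++ [d] else acc) [] with hvalid
    by_cases hv : valid = []
    · rw [if_pos hv, if_pos hv]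
    · rw [if_neg hv, if_neg hv]
      have hvfilter : valid = doc.filter (fun d =>
          (face.any (fun fb => pvContains d (pvCenter fb)))
            && (text.any (fun tb => pvContains d (pvCenter tb)))) := by
        rw [hvalid, PySem.List.foldl_append_if_eq_filter]
        simp
      refine Prod.ext rfl (Prod.ext ?_ ?_)
      · have h : ∀ (k : Nat) (hk : k < face.length),
            (((0 + k : Nat) : Int) ∈ (doc.foldl
              (fun (st : List (Int × Int × Int × Int) × PySem.Set Int × PySem.Set Int) d =>
                if pvIdxSet d (face.map pvCenter) ≠ [] ∧ pvIdxSet d (text.map pvCenter) ≠ [] then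
                  (st.1 ++ [d], PySem.Set.union st.2.1 (pvIdxSet d (face.map pvCenter)), PySem.Set.union st.2.2 (pvIdxSet d (text.map pvCenter)))
                else st) ([], [], [])).2.1
              ↔ (fun fb => valid.any (fun d => pvContains d (pvCenter fb))) face[k] = true) := by
          intro k hk
          simp only [Nat.zero_add]
          rw [(fold_keep_mem doc face text [] [] [] (k : Int)).1]
          simp only [List.not_mem_nil, false_or]
          constructor
          · rintro ⟨d, hd, hcond, hm⟩
            rw [List.any_eq_true]
            refine ⟨d, ?_, (mem_pvIdxSet_nat d face k hk).mp hm⟩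
            rw [hvfilter, List.mem_filter]
            exact ⟨hd, (cond_iff d face text).mp hcond⟩
          · intro hAny
            rw [List.any_eq_true] at hAny
            obtain ⟨d, hd, hc⟩ := hAny
            rw [hvfilter, List.mem_filter] at hd
            exact ⟨d, hd.1, (cond_iff d face text).mpr hd.2, (mem_pvIdxSet_nat d face k hk).mpr hc⟩
        have := filter_enumerate_eq face ((doc.foldl
              (fun (st : List (Int × Int × Int × Int) × PySem.Set Int × PySem.Set Int) d =>
                if pvIdxSet d (face.map pvCenter) ≠ [] ∧ pvIdxSet d (text.map pvCenter) ≠ [] then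
                  (st.1 ++ [d], PySem.Set.union st.2.1 (pvIdxSet d (face.map pvCenter)), PySem.Set.union st.2.2 (pvIdxSet d (text.map pvCenter)))
                else st) ([], [], [])).2.1)
          (fun fb => valid.any (fun d => pvContains d (pvCenter fb))) 0 h
        simpa using this.symm
      · have h : ∀ (k : Nat) (hk : k < text.length),
            (((0 + k : Nat) : Int) ∈ (doc.foldl
              (fun (st : List (Int × Int × Int × Int) × PySem.Set Int × PySem.Set Int) d =>
                if pvIdxSet d (face.map pvCenter) ≠ [] ∧ pvIdxSet d (text.map pvCenter) ≠ [] then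
                  (st.1 ++ [d], PySem.Set.union st.2.1 (pvIdxSet d (face.map pvCenter)), PySem.Set.union st.2.2 (pvIdxSet d (text.map pvCenter)))
                else st) ([], [], [])).2.2
              ↔ (fun tb => valid.any (fun d => pvContains d (pvCenter tb))) text[k] = true) := by
          intro k hk
          simp only [Nat.zero_add]
          rw [(fold_keep_mem doc face text [] [] [] (k : Int)).2]
          simp only [List.not_mem_nil, false_or]
          constructor
          · rintro ⟨d, hd, hcond, hm⟩
            rw [List.any_eq_true]
            refine ⟨d, ?_, (mem_pvIdxSet_nat d text k hk).mp hm⟩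
            rw [hvfilter, List.mem_filter]
            exact ⟨hd, (cond_iff d face text).mp hcond⟩
          · intro hAny
            rw [List.any_eq_true] at hAny
            obtain ⟨d, hd, hc⟩ := hAny
            rw [hvfilter, List.mem_filter] at hd
            exact ⟨d, hd.1, (cond_iff d face text).mpr hd.2, (mem_pvIdxSet_nat d text k hk).mpr hc⟩
        have := filter_enumerate_eq text ((doc.foldl
              (fun (st : List (Int × Int × Int × Int) × PySem.Set Int × PySem.Set Int) d =>
                if pvIdxSet d (face.map pvCenter) ≠ [] ∧ pvIdxSet d (text.map pvCenter) ≠ [] then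
                  (st.1 ++ [d], PySem.Set.union st.2.1 (pvIdxSet d (face.map pvCenter)), PySem.Set.union st.2.2 (pvIdxSet d (text.map pvCenter)))
                else st) ([], [], [])).2.2)
          (fun tb => valid.any (fun d => pvContains d (pvCenter tb))) 0 h
        simpa using this.symm
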